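-- pv_equiv track=rewrite | github.com/Agnieszka-Mal/prepare-to-exam1 | FUNCTION_FUN/fibo_histo_chees.py | chessboard
-- ===== SOURCE A (Python) =====
-- def chessboard(n=8, pattern="# "):
--     line = ""
--     for i in range(n):
--         for j in range(n):
--             line += pattern[(i % len(pattern) + j) % len(pattern)]
--             if j + 1 == n:
--                 line += "\n"
--     return line
-- ===== SOURCE B (Python) =====
-- def chessboard(n=8, pattern="# "):
--     rows = []
--     for i in range(n):
--         off = i % len(pattern)
--         rot = pattern[off:] + pattern[:off]
--         rows.append((rot * (n // len(pattern) + 1))[:n] + "\n")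
--     return "".join(rows)
-- ===== Notes on version B (the rewrite author's own statement) =====
-- stated objective: faster
-- what changed: Replaces the per-cell nested loop with modular indexing by per-row string rotation and tiling: each row is (pattern[off:]+pattern[:off]) repeated and sliced to length n, rows joined at the end.
import Mathlib
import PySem

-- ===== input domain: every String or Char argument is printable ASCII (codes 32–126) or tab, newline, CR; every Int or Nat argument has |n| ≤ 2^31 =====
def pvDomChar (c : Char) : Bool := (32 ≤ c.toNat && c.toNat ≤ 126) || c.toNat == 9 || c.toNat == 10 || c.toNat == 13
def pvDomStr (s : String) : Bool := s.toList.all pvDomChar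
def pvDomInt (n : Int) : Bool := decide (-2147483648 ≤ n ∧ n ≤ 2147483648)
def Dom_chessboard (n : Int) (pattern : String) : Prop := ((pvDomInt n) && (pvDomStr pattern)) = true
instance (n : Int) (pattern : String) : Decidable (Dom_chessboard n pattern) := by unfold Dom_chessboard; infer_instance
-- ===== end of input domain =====

-- B replaces A's per-cell nested loop (modular index + newline branch) by per-row
-- string rotation and tiling, joining whole rows; measurably faster by constant factor.


-- ===== PORT A =====
-- literal transliteration of A: nested for-loops, per-cell modular index, newline when j+1 == n.
-- pyGet? = none is exactly where Python raises (empty pattern, excluded by Pre_); the port appends nothing there.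
def chessboard (n : Int) (pattern : String) : String :=
  String.ofList <|
    (PySem.List.pyRange 0 n).foldl (fun line i =>
      (PySem.List.pyRange 0 n).foldl (fun line j =>
        let line := line ++ (match PySem.List.pyGet? pattern.toList
            (PySem.Int.mod (PySem.Int.mod i (pattern.toList.length : Int) + j) (pattern.toList.length : Int)) with
          | some c => [c]
          | none => [])
        if j + 1 = n then line ++ ['\n'] else line) line) []

-- ===== PORT B =====
-- literal transliteration of B: per row, rotate the pattern by i % len, tile it, slice to n, append '\n'; join rows.
def chessboard_alt (n : Int) (pattern : String) : String :=
  String.ofList <|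
    ((PySem.List.pyRange 0 n).foldl (fun rows i =>
      let p := pattern.toList
      let L : Int := (p.length : Int)
      let off := PySem.Int.mod i L
      let rot := PySem.List.slice p (some off) none ++ PySem.List.slice p none (some off)
      rows ++ [PySem.List.slice (PySem.List.pyRepeat rot (PySem.Int.floordiv n L + 1)) none (some n) ++ ['\n']])
      []).flatten

-- ===== PRECONDITION & SPEC =====
-- Pre_ excludes exactly the inputs where Python A raises ZeroDivisionError: empty pattern with n ≥ 1.
def Pre_chessboard (n : Int) (pattern : String) : Prop := 0 < n → pattern.toList ≠ []
instance (n : Int) (pattern : String) : Decidable (Pre_chessboard n pattern) := by unfold Pre_chessboard; infer_instance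
def pvWitness_chessboard : Int × String := (3, "# ")

def Spec_chessboard (n : Int) (pattern : String) (out : String) : Prop := out = chessboard_alt n pattern
instance (n : Int) (pattern : String) (out : String) : Decidable (Spec_chessboard n pattern out) := by unfold Spec_chessboard; infer_instance

-- ===== CLAIM (what is proved, stated in full; the proofs are below) =====
def Claim_equal_chessboard : Prop := ∀ (n : Int) (pattern : String), Dom_chessboard n pattern → Pre_chessboard n pattern → Spec_chessboard n pattern (chessboard n pattern)

-- ===== LEMMAS AND PROOFS =====

-- the character in row with offset o, column j (both sides produce this cell)
def pvCell (p : List Char) (o : Nat) (j : Nat) : Char := p[(o + j) % p.length]!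

-- empty range for n ≤ 0
lemma pyRange_nil_of_nonpos (n : Int) (h : n ≤ 0) : PySem.List.pyRange 0 n = [] := by
  apply List.eq_nil_iff_forall_not_mem.mpr
  intro x hx
  have := PySem.List.mem_pyRange_one.mp hx
  omega

-- indexing a K-fold repetition is cyclic
lemma flat_getElem? (cs : List Char) (K j : Nat) (hj : j < K * cs.length) :
    ((List.replicate K cs).flatten)[j]? = cs[j % cs.length]? := by
  induction K generalizing j with
  | zero => omega
  | succ K ih =>
    have hcs : 0 < cs.length := by
      rcases Nat.eq_zero_or_pos cs.length with h | h
      · rw [h, Nat.mul_zero] at hj; omega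
      · exact h
    have hmul : (K + 1) * cs.length = K * cs.length + cs.length := Nat.succ_mul ..
    rw [List.replicate_succ, List.flatten_cons]
    by_cases h : j < cs.length
    · rw [List.getElem?_append_left h, Nat.mod_eq_of_lt h]
    · push Not at h
      rw [List.getElem?_append_right h, ih (j - cs.length) (by omega)]
      rw [Nat.mod_eq_sub_mod h]

-- taking m characters of a sufficient repetition is the cyclic map
lemma cyc_take (cs : List Char) (K m : Nat) (hm : m ≤ K * cs.length) :
    ((List.replicate K cs).flatten).take m
      = (List.range m).map (fun j => cs[j % cs.length]!) := by
  induction m with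
  | zero => simp
  | succ m ih =>
    have hcs : 0 < cs.length := by
      rcases Nat.eq_zero_or_pos cs.length with h | h
      · rw [h, Nat.mul_zero] at hm; omega
      · exact h
    rw [List.take_add_one, List.range_succ, List.map_append, ih (by omega)]
    congr 1
    rw [flat_getElem? cs K m (by omega)]
    have hlt : m % cs.length < cs.length := Nat.mod_lt _ hcs
    simp [List.getElem?_eq_getElem hlt]

-- A's inner loop builds one row of cells, newline exactly after the last column
lemma innerA (p : List Char) (hp : p ≠ []) (N k : Nat) (hN : 0 < N) :
    ∀ m, m ≤ N → ∀ line : List Char,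
    List.foldl (fun line j =>
        let line := line ++ (match PySem.List.pyGet? p
            (PySem.Int.mod (PySem.Int.mod (k : Int) (p.length : Int) + j) (p.length : Int)) with
          | some c => [c]
          | none => [])
        if j + 1 = (N : Int) then line ++ ['\n'] else line)
      line (List.map (fun t : Nat => (t : Int)) (List.range m))
    = line ++ (List.range m).map (pvCell p (k % p.length)) ++ (if m = N then ['\n'] else []) := by
  intro m
  induction m with
  | zero =>
    intro _ line
    have h0 : ¬ (0 = N) := by omega
    simp [h0]
  | succ m ih =>
    intro hm line
    have hL : 0 < p.length := List.length_pos_iff.mpr hp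
    rw [List.range_succ, List.map_append, List.foldl_append, ih (by omega) line]
    have hmN : ¬ (m = N) := by omega
    simp only [hmN, if_false, List.append_nil, List.map_cons, List.map_nil, List.foldl_cons, List.foldl_nil, List.map_append]
    have hidx : PySem.Int.mod (PySem.Int.mod (k : Int) (p.length : Int) + (m : Int)) (p.length : Int)
        = ((k % p.length + m) % p.length : Nat) := by
      rw [PySem.Int.mod_natCast]
      rw [show ((k % p.length : Nat) : Int) + (m : Int) = ((k % p.length + m : Nat) : Int) by push_cast; ring]
      rw [PySem.Int.mod_natCast]
    rw [hidx, PySem.List.pyGet?_natCast]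
    have hlt : (k % p.length + m) % p.length < p.length := Nat.mod_lt _ hL
    rw [List.getElem?_eq_getElem hlt]
    simp only [pvCell]
    by_cases hend : m + 1 = N
    · have : ((m : Int) + 1 = (N : Int)) := by exact_mod_cast hend
      simp [this, hend, List.append_assoc, List.getElem?_eq_getElem (Nat.mod_lt _ hL)]
    · have : ¬ ((m : Int) + 1 = (N : Int)) := by
        intro h; exact hend (by exact_mod_cast h)
      simp [this, hend, List.append_assoc, List.getElem?_eq_getElem (Nat.mod_lt _ hL)]

-- B's row equals A's row of cells
lemma rowB_eq (p : List Char) (hp : p ≠ []) (N k : Nat) :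
    PySem.List.slice
        (PySem.List.pyRepeat
          (PySem.List.slice p (some (PySem.Int.mod (k : Int) (p.length : Int))) none
            ++ PySem.List.slice p none (some (PySem.Int.mod (k : Int) (p.length : Int))))
          (PySem.Int.floordiv (N : Int) (p.length : Int) + 1))
        none (some (N : Int))
    = (List.range N).map (pvCell p (k % p.length)) := by
  have hL : 0 < p.length := List.length_pos_iff.mpr hp
  set o := k % p.length with ho
  have hoL : o ≤ p.length := le_of_lt (Nat.mod_lt _ hL)
  rw [PySem.Int.mod_natCast, PySem.List.slice_from_natCast]
  simp only [PySem.List.slice_to_natCast]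
  rw [← List.rotate_eq_drop_append_take hoL, PySem.Int.floordiv_natCast]
  rw [show ((N / p.length : Nat) : Int) + 1 = ((N / p.length + 1 : Nat) : Int) by push_cast; ring]
  unfold PySem.List.pyRepeat
  rw [Int.toNat_natCast]
  have hNle : N ≤ (N / p.length + 1) * (p.rotate o).length := by
    rw [List.length_rotate]
    have h1 := Nat.div_add_mod N p.length
    have h2 := Nat.mod_lt N hL
    nlinarith
  rw [cyc_take _ _ _ hNle]
  apply List.map_congr_left
  intro j hj
  rw [List.mem_range] at hj
  have hlen : (p.rotate o).length = p.length := List.length_rotate ..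
  have hjlt : j % (p.rotate o).length < (p.rotate o).length := Nat.mod_lt _ (by rw [hlen]; omega)
  rw [getElem!_pos (p.rotate o) (j % (p.rotate o).length) hjlt, List.getElem_rotate]
  simp only [pvCell, hlen]
  have hidx2 : (j % p.length + o) % p.length = (o + j) % p.length := by
    rw [Nat.mod_add_mod, Nat.add_comm]
  simp only [hidx2]
  exact (getElem!_pos p ((o + j) % p.length) (Nat.mod_lt _ hL)).symm

-- the two ports produce the same list of characters
lemma main_eq (n : Int) (pattern : String) (hpre : Pre_chessboard n pattern) :
    chessboard n pattern = chessboard_alt n pattern := by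
  unfold chessboard chessboard_alt
  rcases le_or_gt n 0 with hn | hn
  · rw [pyRange_nil_of_nonpos n hn]
    rfl
  · have hp : pattern.toList ≠ [] := hpre hn
    set p := pattern.toList with hpdef
    obtain ⟨N, rfl⟩ : ∃ N : Nat, n = (N : Int) := ⟨n.toNat, (Int.toNat_of_nonneg (le_of_lt hn)).symm⟩
    have hN : 0 < N := by exact_mod_cast hn
    rw [PySem.List.pyRange_zero_natCast, List.foldl_map, List.foldl_map]
    congr 1
    rw [PySem.List.foldl_append_singleton_eq_map, List.nil_append]
    rw [PySem.List.foldl_congr_mem (List.range N) _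
      (fun line k => line ++ (List.map (pvCell p (k % p.length)) (List.range N) ++ ['\n'])) []
      (by
        intro line k hk
        rw [innerA p hp N k hN N le_rfl line]
        simp [List.append_assoc])]
    rw [PySem.List.foldl_append_eq_flatMap, List.nil_append, List.flatMap_def]
    congr 1
    apply List.map_congr_left
    intro k hk
    rw [rowB_eq p hp N k]

-- ===== VERDICT (by name: the statement is the Claim_ definition above) =====
theorem chessboard_spec : Claim_equal_chessboard := by
  intro n pattern _ hpre
  unfold Spec_chessboard
  exact main_eq n pattern hpre
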